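-- pv_equiv track=rewrite | github.com/aiur-adept/arcana | simulate.py | greedy_sacrifice_indices
-- ===== SOURCE A (Python) =====
-- from typing import List, Dict, Tuple, Optional, Any
--
-- def greedy_sacrifice_indices(rituals: List[int], need: int) -> List[int]:
--     indexed = list(enumerate(rituals))
--     indexed.sort(key=lambda kv: kv[1])  # lowest first
--     out: List[int] = []
--     total = 0
--     for idx, v in indexed:
--         out.append(idx)
--         total += v
--         if total >= need:
--             return out
--     return []
-- ===== SOURCE B (Python) =====
-- from typing import List
--
-- def greedy_sacrifice_indices(rituals: List[int], need: int) -> List[int]: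
--     pairs = sorted(enumerate(rituals), key=lambda kv: kv[1])
--     prefix = []
--     t = 0
--     for _, v in pairs:
--         t += v
--         prefix.append(t)
--     for p, s in enumerate(prefix):
--         if s >= need:
--             return [i for i, _ in pairs[:p + 1]]
--     return []
-- ===== Notes on version B (the rewrite author's own statement) =====
-- stated objective: alternative
-- what changed: A's single online loop that appends indices and returns the moment the running total reaches need is replaced by a three-stage decomposition: build a prefix-sum table over the sorted pairs, search it for the first position meeting the threshold, and slice the sorted pairs there.
import Mathlib
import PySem

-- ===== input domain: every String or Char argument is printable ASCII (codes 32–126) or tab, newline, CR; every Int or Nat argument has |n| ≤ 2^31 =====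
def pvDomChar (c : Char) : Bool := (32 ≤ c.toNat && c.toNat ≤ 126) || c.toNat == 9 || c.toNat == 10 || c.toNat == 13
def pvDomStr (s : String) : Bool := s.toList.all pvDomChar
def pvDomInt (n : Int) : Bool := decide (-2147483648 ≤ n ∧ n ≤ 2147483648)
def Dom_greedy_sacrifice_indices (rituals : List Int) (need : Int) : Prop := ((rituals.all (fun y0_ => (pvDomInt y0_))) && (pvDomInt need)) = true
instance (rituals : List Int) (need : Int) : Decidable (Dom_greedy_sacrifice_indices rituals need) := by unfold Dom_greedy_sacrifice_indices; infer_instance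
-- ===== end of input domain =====

-- B replaces A's online accumulate-and-return loop by a prefix-sum table, a first-threshold search,
-- and a slice of the sorted pairs (alternative decomposition, same O(n log n) cost).


-- ===== PORT A =====
-- the 'for idx, v in indexed' loop with accumulators out, total
def aLoop (need : Int) : List (Int × Int) → List Int → Int → List Int
  | [], _, _ => []
  | kv :: rest, out, total =>
      let out' := out ++ [kv.1]
      let total' := total + kv.2
      if total' ≥ need then out' else aLoop need rest out' total'

def greedy_sacrifice_indices (rituals : List Int) (need : Int) : List Int :=
  let indexed := PySem.List.sorted (PySem.List.enumerate rituals) (fun kv => kv.2) false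
  aLoop need indexed [] 0

-- ===== PORT B =====
-- the 'for p, s in enumerate(prefix)' threshold-search loop
def altFind (need : Int) : List (Int × Int) → Option Int
  | [] => none
  | ps :: rest => if ps.2 ≥ need then some ps.1 else altFind need rest

def greedy_sacrifice_indices_alt (rituals : List Int) (need : Int) : List Int :=
  let pairs := PySem.List.sorted (PySem.List.enumerate rituals) (fun kv => kv.2) false
  -- the prefix-sum building loop (t, prefix as accumulators)
  let st := pairs.foldl (fun (st : Int × List Int) kv => (st.1 + kv.2, st.2 ++ [st.1 + kv.2])) (0, [])
  match altFind need (PySem.List.enumerate st.2) with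
  | some p => (PySem.List.slice pairs (some 0) (some (p + 1))).map (fun kv => kv.1)
  | none => []

-- ===== PRECONDITION & SPEC =====
def Spec_greedy_sacrifice_indices (rituals : List Int) (need : Int) (out : List Int) : Prop := out = greedy_sacrifice_indices_alt rituals need
instance (rituals : List Int) (need : Int) (out : List Int) : Decidable (Spec_greedy_sacrifice_indices rituals need out) := by unfold Spec_greedy_sacrifice_indices; infer_instance

-- ===== CLAIM (what is proved, stated in full; the proofs are below) =====
def Claim_equal_greedy_sacrifice_indices : Prop := ∀ (rituals : List Int) (need : Int), Dom_greedy_sacrifice_indices rituals need → Spec_greedy_sacrifice_indices rituals need (greedy_sacrifice_indices rituals need)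

-- ===== LEMMAS AND PROOFS =====

-- running prefix sums of the second components, starting from t
def prefList (t : Int) : List (Int × Int) → List Int
  | [] => []
  | kv :: r => (t + kv.2) :: prefList (t + kv.2) r

theorem foldl_prefList (L : List (Int × Int)) : ∀ (t : Int) (acc : List Int),
    L.foldl (fun (st : Int × List Int) kv => (st.1 + kv.2, st.2 ++ [st.1 + kv.2])) (t, acc)
      = (L.foldl (fun a kv => a + kv.2) t, acc ++ prefList t L) := by
  induction L with
  | nil => intro t acc; simp [prefList]
  | cons kv r ih =>
      intro t acc
      simp only [List.foldl_cons, prefList, ih (t + kv.2) (acc ++ [t + kv.2])]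
      simp

theorem altFind_ge (need : Int) (xs : List Int) : ∀ (c p : Int),
    altFind need (PySem.List.enumerate xs c) = some p → c ≤ p := by
  induction xs with
  | nil => intro c p h; simp [PySem.List.enumerate_nil, altFind] at h
  | cons x r ih =>
      intro c p h
      rw [PySem.List.enumerate_cons] at h
      by_cases hx : x ≥ need
      · simp [altFind, hx] at h; omega
      · simp [altFind, hx] at h
        have := ih (c + 1) p h
        omega

theorem main_loop (need : Int) (L : List (Int × Int)) : ∀ (total : Int) (out : List Int) (c : Int),
    aLoop need L out total =
      match altFind need (PySem.List.enumerate (prefList total L) c) with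
      | some p => out ++ (L.take (p + 1 - c).toNat).map (fun kv => kv.1)
      | none => [] := by
  induction L with
  | nil => intro total out c; simp [aLoop, prefList, PySem.List.enumerate_nil, altFind]
  | cons kv r ih =>
      intro total out c
      rw [prefList, PySem.List.enumerate_cons]
      by_cases h : total + kv.2 ≥ need
      · simp [aLoop, altFind, h]
      · simp only [aLoop, altFind, h, if_false]
        rw [ih (total + kv.2) (out ++ [kv.1]) (c + 1)]
        cases hf : altFind need (PySem.List.enumerate (prefList (total + kv.2) r) (c + 1)) with
        | none => simp
        | some p =>
            have hcp : c + 1 ≤ p := altFind_ge need _ (c + 1) p hf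
            have h2 : (p + 1 - c).toNat = (p + 1 - (c + 1)).toNat + 1 := by omega
            simp [h2, List.take_succ_cons]

theorem greedy_sacrifice_indices_eq (rituals : List Int) (need : Int) :
    greedy_sacrifice_indices rituals need = greedy_sacrifice_indices_alt rituals need := by
  unfold greedy_sacrifice_indices greedy_sacrifice_indices_alt
  dsimp only
  set pairs := PySem.List.sorted (PySem.List.enumerate rituals) (fun kv => kv.2) false with hp
  rw [foldl_prefList pairs 0 []]
  simp only [List.nil_append]
  rw [main_loop need pairs 0 [] 0]
  cases hf : altFind need (PySem.List.enumerate (prefList 0 pairs) 0) with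
  | none => simp
  | some p =>
      have hp0 : (0 : Int) ≤ p := altFind_ge need _ 0 p hf
      have : PySem.List.slice pairs (some 0) (some (p + 1)) = pairs.take (p + 1).toNat := by
        rw [PySem.List.slice_zero_start, PySem.List.slice_to _ (by omega)]
      simp [this]

-- ===== VERDICT (by name: the statement is the Claim_ definition above) =====
theorem greedy_sacrifice_indices_spec : Claim_equal_greedy_sacrifice_indices := by
  intro rituals need _
  unfold Spec_greedy_sacrifice_indices
  exact greedy_sacrifice_indices_eq rituals need
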